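-- pv_equiv track=rewrite | github.com/vellankis-space/FlowPilot-AI | backend/scrape_automation_anywhere.py | _map_output
-- ===== SOURCE A (Python) =====
-- from typing import Dict, List, Optional, Tuple
--
-- def _map_output(rows: List[Dict[str, str]]) -> List[Dict[str, str]]:
--     out: List[Dict[str, str]] = []
--     for r in rows:
--         argument = r.get("Variable") or r.get("Name") or r.get("Output") or r.get("Col1")
--         ptype = r.get("Type") or r.get("Accepts") or r.get("Col2")
--         description = r.get("Description") or r.get("Col3")
--         item: Dict[str, str] = {}
--         if argument:
--             item["Argument"] = argument
--         if ptype: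
--             item["Type"] = ptype
--         if description:
--             item["Description"] = description
--         if item:
--             out.append(item)
--     return out
-- ===== SOURCE B (Python) =====
-- from typing import Dict, List
--
-- # Inverted index: source column name -> (output slot, priority rank).
-- _SOURCE = {
--     "Variable": (0, 0), "Name": (0, 1), "Output": (0, 2), "Col1": (0, 3),
--     "Type": (1, 0), "Accepts": (1, 1), "Col2": (1, 2),
--     "Description": (2, 0), "Col3": (2, 1),
-- }
-- _FIELDS = ("Argument", "Type", "Description")
--
-- def _map_output(rows: List[Dict[str, str]]) -> List[Dict[str, str]]:
--     out: List[Dict[str, str]] = []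
--     for r in rows:
--         best = [None, None, None]  # per slot: (rank, value) of best candidate so far
--         for k, v in r.items():
--             hit = _SOURCE.get(k)
--             if hit and v:
--                 slot, rank = hit
--                 if best[slot] is None or rank < best[slot][0]:
--                     best[slot] = (rank, v)
--         item = {f: b[1] for f, b in zip(_FIELDS, best) if b is not None}
--         if item:
--             out.append(item)
--     return out
-- ===== Notes on version B (the rewrite author's own statement) =====
-- stated objective: alternative
-- what changed: Instead of resolving each output field by its own chain of r.get lookups, B makes a single inverted pass over each row's items with a module-level inverted index (source key -> (slot, rank)), keeping the minimal-rank truthy value per output slot, then emits the three fields in fixed order.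
import Mathlib
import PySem

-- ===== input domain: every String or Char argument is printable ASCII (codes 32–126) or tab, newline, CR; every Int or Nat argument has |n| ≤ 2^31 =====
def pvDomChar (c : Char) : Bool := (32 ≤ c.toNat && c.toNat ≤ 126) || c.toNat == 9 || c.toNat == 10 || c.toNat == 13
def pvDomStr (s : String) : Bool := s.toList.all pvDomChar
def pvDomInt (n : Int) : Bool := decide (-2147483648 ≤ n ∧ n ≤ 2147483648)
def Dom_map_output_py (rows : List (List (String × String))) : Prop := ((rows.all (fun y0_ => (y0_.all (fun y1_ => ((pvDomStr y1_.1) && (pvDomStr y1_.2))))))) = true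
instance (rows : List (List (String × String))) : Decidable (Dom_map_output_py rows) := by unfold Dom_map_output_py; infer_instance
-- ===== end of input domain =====

-- B replaces A's per-field chains of r.get lookups by a single inverted pass over each
-- row's items with an inverted index (source key -> (slot, rank)), keeping the minimal-rank
-- truthy value per output slot (objective: alternative, same cost).

-- ===== PORT A =====
-- Python truthiness of an Optional[str]: None and "" are falsy.
def pyTruthy : Option String → Bool
  | none => false
  | some s => !s.toList.isEmpty

-- Python's 'x or y' on Optional[str] values.
def pyOr (a b : Option String) : Option String := if pyTruthy a then a else b

-- the body of A's 'for r in rows' loop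
def mapOutputStepA (out : List (List (String × String))) (r : List (String × String)) :
    List (List (String × String)) :=
  let argument := pyOr (pyOr (pyOr (r.lookup "Variable") (r.lookup "Name"))
      (r.lookup "Output")) (r.lookup "Col1")
  let ptype := pyOr (pyOr (r.lookup "Type") (r.lookup "Accepts"))
      (r.lookup "Col2")
  let description := pyOr (r.lookup "Description") (r.lookup "Col3")
  -- r.get(k) on the assoc-list dict = first match; item["K"] = v with a fresh key K
  -- appends (K, v) in insertion order (the three keys below are distinct).
  let item : List (String × String) := []
  let item := if pyTruthy argument then item ++ [("Argument", argument.getD "")] else item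
  let item := if pyTruthy ptype then item ++ [("Type", ptype.getD "")] else item
  let item := if pyTruthy description then item ++ [("Description", description.getD "")] else item
  if !item.isEmpty then out ++ [item] else out

def map_output_py (rows : List (List (String × String))) : List (List (String × String)) :=
  rows.foldl mapOutputStepA []

-- ===== PORT B =====
-- _SOURCE: inverted index, source column name -> (output slot, priority rank)
def pvSource : List (String × (Nat × Nat)) :=
  [("Variable", (0, 0)), ("Name", (0, 1)), ("Output", (0, 2)), ("Col1", (0, 3)),
   ("Type", (1, 0)), ("Accepts", (1, 1)), ("Col2", (1, 2)),
   ("Description", (2, 0)), ("Col3", (2, 1))]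

def pvFields : List String := ["Argument", "Type", "Description"]

-- r.items(): each key exactly once; under the dict -> assoc-list convention
-- (lookup = first match) that is the first occurrence of each key.
def firstOcc : List (String × String) → List (String × String)
  | [] => []
  | p :: rest => p :: firstOcc (rest.filter (fun q => !(q.1 == p.1)))
termination_by l => l.length
decreasing_by
  simp only [List.length_unattach]
  exact Nat.lt_succ_of_le (le_trans (List.length_filter_le _ _) (by simp))

-- body of B's 'for k, v in r.items()' loop; best[slot] via getD/set (slot is always < 3)
def stepB (best : List (Option (Nat × String))) (p : String × String) :
    List (Option (Nat × String)) :=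
  match pvSource.lookup p.1 with
  | some (slot, rank) =>
    if pyTruthy (some p.2) then
      match best.getD slot none with
      | none => best.set slot (some (rank, p.2))
      | some q => if rank < q.1 then best.set slot (some (rank, p.2)) else best
    else best
  | none => best

-- the dict comprehension {f: b[1] for f, b in zip(_FIELDS, best) if b is not None}
def rowItemB (r : List (String × String)) : List (String × String) :=
  let best := (firstOcc r).foldl stepB [none, none, none]
  (pvFields.zip best).foldl (fun item fb =>
    match fb.2 with
    | some q => item ++ [(fb.1, q.2)]
    | none => item) []

def map_output_py_alt (rows : List (List (String × String))) : List (List (String × String)) :=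
  rows.foldl (fun out r =>
    let item := rowItemB r
    if !item.isEmpty then out ++ [item] else out) []

-- ===== PRECONDITION & SPEC =====
def Spec_map_output_py (rows : List (List (String × String))) (out : List (List (String × String))) : Prop := out = map_output_py_alt rows
instance (rows : List (List (String × String))) (out : List (List (String × String))) : Decidable (Spec_map_output_py rows out) := by unfold Spec_map_output_py; infer_instance

-- ===== CLAIM (what is proved, stated in full; the proofs are below) =====
def Claim_equal_map_output_py : Prop := ∀ (rows : List (List (String × String))), Dom_map_output_py rows → Spec_map_output_py rows (map_output_py rows)

-- ===== LEMMAS AND PROOFS =====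

-- ranked candidate lists per output slot (proof-side view of pvSource)
def ksrA : List (String × Nat) := [("Variable", 0), ("Name", 1), ("Output", 2), ("Col1", 3)]
def ksrT : List (String × Nat) := [("Type", 0), ("Accepts", 1), ("Col2", 2)]
def ksrD : List (String × Nat) := [("Description", 0), ("Col3", 1)]

-- left-biased minimum by rank
def mergeMin : Option (Nat × String) → Option (Nat × String) → Option (Nat × String)
  | none, c => c
  | some x, none => some x
  | some x, some y => if y.1 < x.1 then some y else some x

-- contribution of one row pair to one slot
def unitF (ksr : List (String × Nat)) (p : String × String) : Option (Nat × String) :=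
  match ksr.lookup p.1 with
  | some rk => if pyTruthy (some p.2) then some (rk, p.2) else none
  | none => none

def stepF (ksr : List (String × Nat)) (b : Option (Nat × String)) (p : String × String) :
    Option (Nat × String) := mergeMin b (unitF ksr p)

-- first truthy candidate (with its rank) in candidate order
def chainR (ps : List (String × String)) : List (String × Nat) → Option (Nat × String)
  | [] => none
  | (k, rk) :: rest =>
    if pyTruthy (ps.lookup k) then some (rk, (ps.lookup k).getD "") else chainR ps rest

-- A-shaped or-chain (right-nested, no trailing none)
def pyOrChain (ps : List (String × String)) : List String → Option String
  | [] => none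
  | [k] => ps.lookup k
  | k :: ks => pyOr (ps.lookup k) (pyOrChain ps ks)

theorem mergeMin_none_right (b : Option (Nat × String)) : mergeMin b none = b := by
  cases b <;> rfl

theorem mergeMin_none_left (c : Option (Nat × String)) : mergeMin none c = c := rfl

theorem mergeMin_some_some (x y : Nat × String) :
    mergeMin (some x) (some y) = if y.1 < x.1 then some y else some x := rfl

theorem truthy_eq_some (l : Option String) (h : pyTruthy l = true) : l = some (l.getD "") := by
  cases l with
  | none => simp [pyTruthy] at h
  | some s => rfl

theorem chainR_nil (ksr : List (String × Nat)) : chainR [] ksr = none := by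
  induction ksr with
  | nil => rfl
  | cons p rest ih => rcases p with ⟨k, rk⟩; simp [chainR, List.lookup, pyTruthy, ih]

theorem chainR_rank_mem (ps : List (String × String)) (ksr : List (String × Nat))
    (q : Nat × String) (h : chainR ps ksr = some q) : q.1 ∈ ksr.map (·.2) := by
  induction ksr with
  | nil => simp [chainR] at h
  | cons p rest ih =>
    rcases p with ⟨k, rk⟩
    rw [chainR] at h
    split_ifs at h with hv
    · obtain rfl : (rk, (ps.lookup k).getD "") = q := Option.some_inj.mp h
      simp
    · simpa using Or.inr (ih h)

theorem lookup_rank_mem (ksr : List (String × Nat)) (k : String) (rk : Nat)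
    (h : ksr.lookup k = some rk) : rk ∈ ksr.map (·.2) := by
  induction ksr with
  | nil => simp at h
  | cons p rest ih =>
    rcases p with ⟨k', rk'⟩
    rw [List.lookup] at h
    cases hk : (k == k') with
    | true => rw [hk] at h; simp at h; simp [h]
    | false => rw [hk] at h; simpa using Or.inr (ih h)

theorem chainR_cons_not_key (ps : List (String × String)) (k : String) (v : String)
    (ksr : List (String × Nat)) (h : k ∉ ksr.map (·.1)) :
    chainR ((k, v) :: ps) ksr = chainR ps ksr := by
  induction ksr with
  | nil => rfl
  | cons p rest ih =>
    rcases p with ⟨c, rc⟩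
    simp only [List.map_cons, List.mem_cons] at h
    push_neg at h
    have hck : (k == c) = false := beq_eq_false_iff_ne.mpr h.1
    rw [chainR, chainR, List.lookup]
    have hck : (c == k) = false := beq_eq_false_iff_ne.mpr (fun hc => h.1 hc.symm)
    rw [hck]
    split_ifs <;> simp [ih h.2]

theorem lookup_none_of_not_mem_keys (ps : List (String × String)) (k : String)
    (h : k ∉ ps.map (·.1)) : ps.lookup k = none := by
  induction ps with
  | nil => rfl
  | cons p rest ih =>
    rcases p with ⟨k2, v2⟩
    simp only [List.map_cons, List.mem_cons] at h
    push_neg at h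
    have : (k == k2) = false := beq_eq_false_iff_ne.mpr h.1
    simp [List.lookup, this, ih h.2]

theorem mergeMin_unit_chain (rest : List (String × String)) (k v : String)
    (ksr : List (String × Nat)) (hk : k ∉ rest.map (·.1))
    (hnd : (ksr.map (·.1)).Nodup) (hinc : ksr.Pairwise (fun x y => x.2 < y.2)) :
    mergeMin (unitF ksr (k, v)) (chainR rest ksr) = chainR ((k, v) :: rest) ksr := by
  induction ksr with
  | nil => rfl
  | cons p ksr' ih =>
    rcases p with ⟨c, rc⟩
    simp only [List.map_cons, List.nodup_cons] at hnd
    rw [List.pairwise_cons] at hinc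
    by_cases hck : c = k
    · subst hck
      have hrn : rest.lookup c = none := lookup_none_of_not_mem_keys rest c hk
      rw [chainR, chainR]
      have hl1 : ((c, v) :: rest).lookup c = some v := by simp [List.lookup]
      rw [hl1, hrn]
      rw [if_neg (by simp [pyTruthy])]
      have hu : unitF ((c, rc) :: ksr') (c, v) =
          if pyTruthy (some v) = true then some (rc, v) else none := by
        simp [unitF, List.lookup]
      rw [hu]
      by_cases hv : pyTruthy (some v) = true
      · rw [if_pos hv, if_pos hv]
        cases hc : chainR rest ksr' with
        | none => simp [mergeMin_none_right, Option.getD]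
        | some q =>
          have hq : q.1 ∈ ksr'.map (·.2) := chainR_rank_mem rest ksr' q hc
          rcases List.mem_map.mp hq with ⟨x, hx, hxe⟩
          have hlt : rc < q.1 := by have := hinc.1 x hx; omega
          simp [mergeMin_some_some, Option.getD, Nat.lt_asymm hlt]
      · rw [if_neg hv, if_neg hv, mergeMin_none_left]
        rw [chainR_cons_not_key rest c v ksr' hnd.1]
    · have hcb : (k == c) = false := beq_eq_false_iff_ne.mpr (fun hc => hck hc.symm)
      have hul : unitF ((c, rc) :: ksr') (k, v) = unitF ksr' (k, v) := by
        simp [unitF, List.lookup, hcb]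
      have hl2 : ((k, v) :: rest).lookup c = rest.lookup c := by
        have h2 : (c == k) = false := beq_eq_false_iff_ne.mpr hck
        simp [List.lookup, h2]
      rw [chainR, chainR, hul, hl2]
      by_cases ht : pyTruthy (rest.lookup c) = true
      · rw [if_pos ht, if_pos ht]
        cases hu : unitF ksr' (k, v) with
        | none => rfl
        | some q =>
          have hq : q.1 ∈ ksr'.map (·.2) := by
            unfold unitF at hu
            cases hlk : ksr'.lookup k with
            | none => rw [hlk] at hu; simp at hu
            | some rk =>
              rw [hlk] at hu
              split_ifs at hu
              exact (Option.some_inj.mp hu) ▸ lookup_rank_mem ksr' k rk hlk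
          rcases List.mem_map.mp hq with ⟨x, hx, hxe⟩
          have hlt : rc < q.1 := by have := hinc.1 x hx; omega
          simp [mergeMin_some_some, Option.getD, hlt]
      · rw [if_neg ht, if_neg ht]
        exact ih hnd.2 hinc.2

theorem mergeMin_assoc (a b c : Option (Nat × String)) :
    mergeMin (mergeMin a b) c = mergeMin a (mergeMin b c) := by
  cases a with
  | none => rfl
  | some x =>
    cases b with
    | none => rfl
    | some y =>
      cases c with
      | none => simp [mergeMin_none_right]
      | some z =>
        rcases x with ⟨ar, as⟩; rcases y with ⟨br, bs⟩; rcases z with ⟨cr, cs⟩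
        by_cases h1 : br < ar <;> by_cases h2 : cr < br <;> by_cases h3 : cr < ar <;>
          simp [mergeMin, h1, h2, h3] <;> first | rfl | (exfalso; omega)

theorem foldl_stepF_acc (ksr : List (String × Nat)) (ps : List (String × String)) :
    ∀ b, ps.foldl (stepF ksr) b = mergeMin b (ps.foldl (stepF ksr) none) := by
  induction ps with
  | nil => intro b; simp [mergeMin_none_right]
  | cons p ps ih =>
    intro b
    simp only [List.foldl_cons]
    rw [ih (stepF ksr b p), ih (stepF ksr none p)]
    have h0 : stepF ksr none p = unitF ksr p := rfl
    rw [h0]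
    show mergeMin (mergeMin b (unitF ksr p)) _ = _
    rw [mergeMin_assoc]

theorem bestF_eq_chainR (ksr : List (String × Nat)) (ps : List (String × String))
    (hps : (ps.map (·.1)).Nodup)
    (hnd : (ksr.map (·.1)).Nodup) (hinc : ksr.Pairwise (fun x y => x.2 < y.2)) :
    ps.foldl (stepF ksr) none = chainR ps ksr := by
  induction ps with
  | nil => simp [chainR_nil]
  | cons p ps ih =>
    rcases p with ⟨k, v⟩
    simp only [List.map_cons, List.nodup_cons] at hps
    simp only [List.foldl_cons]
    rw [foldl_stepF_acc, ih hps.2]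
    have hs : stepF ksr none (k, v) = unitF ksr (k, v) := rfl
    rw [hs, mergeMin_unit_chain ps k v ksr (by simpa using hps.1) hnd hinc]

theorem chain_bridge (ps : List (String × String)) (ksr : List (String × Nat)) :
    (pyTruthy (pyOrChain ps (ksr.map (·.1))) = (chainR ps ksr).isSome) ∧
    (∀ q, chainR ps ksr = some q → pyOrChain ps (ksr.map (·.1)) = some q.2) := by
  induction ksr with
  | nil => simp [pyOrChain, chainR, pyTruthy]
  | cons p rest ih =>
    rcases p with ⟨k, rk⟩
    cases rest with
    | nil =>
      by_cases hl : pyTruthy (ps.lookup k) = true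
      · refine ⟨by simp [pyOrChain, chainR, hl], ?_⟩
        intro q hq
        simp only [chainR, if_pos hl] at hq
        obtain rfl : (rk, (ps.lookup k).getD "") = q := Option.some_inj.mp hq
        simpa [pyOrChain] using truthy_eq_some _ hl
      · refine ⟨by simp [pyOrChain, chainR, hl, Bool.eq_false_iff.mpr hl], ?_⟩
        intro q hq
        simp [chainR, hl] at hq
    | cons p' rest' =>
      have hpo : pyOrChain ps (((k, rk) :: p' :: rest').map (·.1)) =
          pyOr (ps.lookup k) (pyOrChain ps ((p' :: rest').map (·.1))) := rfl
      by_cases hl : pyTruthy (ps.lookup k) = true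
      · refine ⟨?_, ?_⟩
        · rw [hpo]
          simp [pyOr, hl, chainR]
        · intro q hq
          simp only [chainR, if_pos hl] at hq
          obtain rfl : (rk, (ps.lookup k).getD "") = q := Option.some_inj.mp hq
          rw [hpo]
          simpa [pyOr, hl] using truthy_eq_some _ hl
      · refine ⟨?_, ?_⟩
        · rw [hpo]
          simpa [pyOr, hl, chainR] using ih.1
        · intro q hq
          simp only [chainR, hl] at hq
          rw [hpo]
          simp only [pyOr, hl, if_neg hl]
          exact ih.2 q (by simpa [hl] using hq)

theorem pyOr_assoc (a b c : Option String) : pyOr (pyOr a b) c = pyOr a (pyOr b c) := by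
  unfold pyOr
  cases ha : pyTruthy a <;> cases hb : pyTruthy b <;> simp [ha, hb]

theorem lookup_filter_ne (rest : List (String × String)) (c k : String) (h : ¬ k = c) :
    (rest.filter (fun q => !(q.1 == c))).lookup k = rest.lookup k := by
  induction rest with
  | nil => rfl
  | cons p ps ih =>
    rcases p with ⟨k', v'⟩
    by_cases hc : k' = c
    · subst hc
      have hkk : (k == k') = false := beq_eq_false_iff_ne.mpr h
      simp [List.filter, List.lookup, hkk, ih]
    · have : (k' == c) = false := beq_eq_false_iff_ne.mpr hc
      simp only [List.filter, this, Bool.not_false, List.lookup]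
      cases hk : (k == k') <;> simp [hk, List.lookup, ih]

theorem lookup_firstOcc_aux (k : String) :
    ∀ (n : Nat) (r : List (String × String)), r.length ≤ n →
      (firstOcc r).lookup k = r.lookup k := by
  intro n
  induction n with
  | zero =>
    intro r h
    obtain rfl : r = [] := List.eq_nil_of_length_eq_zero (Nat.le_zero.mp h)
    rw [firstOcc]
  | succ n ih =>
    intro r h
    cases r with
    | nil => rw [firstOcc]
    | cons p rest =>
      rcases p with ⟨k', v'⟩
      rw [firstOcc]
      simp only [List.lookup]
      cases hk : (k == k') with
      | true => rfl
      | false =>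
        rw [ih (rest.filter (fun q => !(q.1 == k')))
          (le_trans (List.length_filter_le _ _) (Nat.le_of_succ_le_succ (by simpa using h)))]
        rw [lookup_filter_ne]
        exact fun he => by simp [he] at hk

theorem lookup_firstOcc (r : List (String × String)) (k : String) :
    (firstOcc r).lookup k = r.lookup k :=
  lookup_firstOcc_aux k r.length r (le_refl _)

theorem firstOcc_keys_mem_aux :
    ∀ (n : Nat) (r : List (String × String)) (k : String), r.length ≤ n →
      k ∈ (firstOcc r).map (·.1) → k ∈ r.map (·.1) := by
  intro n
  induction n with
  | zero =>
    intro r k h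
    obtain rfl : r = [] := List.eq_nil_of_length_eq_zero (Nat.le_zero.mp h)
    rw [firstOcc]
    exact fun h' => h'
  | succ n ih =>
    intro r k h hm
    cases r with
    | nil => rw [firstOcc] at hm; exact hm
    | cons p rest =>
      rw [firstOcc] at hm
      simp only [List.map_cons, List.mem_cons] at hm ⊢
      rcases hm with hm | hm
      · exact Or.inl hm
      · have := ih (rest.filter (fun q => !(q.1 == p.1))) k
          (le_trans (List.length_filter_le _ _) (Nat.le_of_succ_le_succ (by simpa using h))) hm
        rcases List.mem_map.mp this with ⟨q, hq, hqe⟩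
        exact Or.inr (List.mem_map.mpr ⟨q, List.mem_of_mem_filter hq, hqe⟩)

theorem firstOcc_keys_nodup_aux :
    ∀ (n : Nat) (r : List (String × String)), r.length ≤ n →
      ((firstOcc r).map (·.1)).Nodup := by
  intro n
  induction n with
  | zero =>
    intro r h
    obtain rfl : r = [] := List.eq_nil_of_length_eq_zero (Nat.le_zero.mp h)
    simp [firstOcc]
  | succ n ih =>
    intro r h
    cases r with
    | nil => simp [firstOcc]
    | cons p rest =>
      rw [firstOcc]
      simp only [List.map_cons, List.nodup_cons]
      have hlen : (rest.filter (fun q => !(q.1 == p.1))).length ≤ n :=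
        le_trans (List.length_filter_le _ _) (Nat.le_of_succ_le_succ (by simpa using h))
      refine ⟨fun hm => ?_, ih _ hlen⟩
      have := firstOcc_keys_mem_aux n _ p.1 hlen hm
      rcases List.mem_map.mp this with ⟨q, hq, hqe⟩
      have := List.of_mem_filter hq
      simp [hqe] at this

theorem firstOcc_keys_nodup (r : List (String × String)) :
    ((firstOcc r).map (·.1)).Nodup :=
  firstOcc_keys_nodup_aux r.length r (le_refl _)

theorem stepB_components (a t d : Option (Nat × String)) (p : String × String) :
    stepB [a, t, d] p = [stepF ksrA a p, stepF ksrT t p, stepF ksrD d p] := by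
  rcases p with ⟨k, v⟩
  by_cases h1 : k = "Variable"
  · subst h1
    cases hv : pyTruthy (some v) <;> cases a <;>
      simp [stepB, stepF, unitF, pvSource, ksrA, ksrT, ksrD, List.lookup, hv,
        mergeMin_none_left, mergeMin_some_some, mergeMin_none_right] <;>
        (try split_ifs <;> simp_all)
  by_cases h2 : k = "Name"
  · subst h2
    cases hv : pyTruthy (some v) <;> cases a <;>
      simp [stepB, stepF, unitF, pvSource, ksrA, ksrT, ksrD, List.lookup, hv,
        mergeMin_none_left, mergeMin_some_some, mergeMin_none_right] <;>
        (try split_ifs <;> simp_all)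
  by_cases h3 : k = "Output"
  · subst h3
    cases hv : pyTruthy (some v) <;> cases a <;>
      simp [stepB, stepF, unitF, pvSource, ksrA, ksrT, ksrD, List.lookup, hv,
        mergeMin_none_left, mergeMin_some_some, mergeMin_none_right] <;>
        (try split_ifs <;> simp_all)
  by_cases h4 : k = "Col1"
  · subst h4
    cases hv : pyTruthy (some v) <;> cases a <;>
      simp [stepB, stepF, unitF, pvSource, ksrA, ksrT, ksrD, List.lookup, hv,
        mergeMin_none_left, mergeMin_some_some, mergeMin_none_right] <;>
        (try split_ifs <;> simp_all)
  by_cases h5 : k = "Type"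
  · subst h5
    cases hv : pyTruthy (some v) <;> cases t <;>
      simp [stepB, stepF, unitF, pvSource, ksrA, ksrT, ksrD, List.lookup, hv,
        mergeMin_none_left, mergeMin_some_some, mergeMin_none_right] <;>
        (try split_ifs <;> simp_all)
  by_cases h6 : k = "Accepts"
  · subst h6
    cases hv : pyTruthy (some v) <;> cases t <;>
      simp [stepB, stepF, unitF, pvSource, ksrA, ksrT, ksrD, List.lookup, hv,
        mergeMin_none_left, mergeMin_some_some, mergeMin_none_right] <;>
        (try split_ifs <;> simp_all)
  by_cases h7 : k = "Col2"
  · subst h7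
    cases hv : pyTruthy (some v) <;> cases t <;>
      simp [stepB, stepF, unitF, pvSource, ksrA, ksrT, ksrD, List.lookup, hv,
        mergeMin_none_left, mergeMin_some_some, mergeMin_none_right] <;>
        (try split_ifs <;> simp_all)
  by_cases h8 : k = "Description"
  · subst h8
    cases hv : pyTruthy (some v) <;> cases d <;>
      simp [stepB, stepF, unitF, pvSource, ksrA, ksrT, ksrD, List.lookup, hv,
        mergeMin_none_left, mergeMin_some_some, mergeMin_none_right] <;>
        (try split_ifs <;> simp_all)
  by_cases h9 : k = "Col3"
  · subst h9
    cases hv : pyTruthy (some v) <;> cases d <;>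
      simp [stepB, stepF, unitF, pvSource, ksrA, ksrT, ksrD, List.lookup, hv,
        mergeMin_none_left, mergeMin_some_some, mergeMin_none_right] <;>
        (try split_ifs <;> simp_all)
  have e1 : (k == "Variable") = false := beq_eq_false_iff_ne.mpr h1
  have e2 : (k == "Name") = false := beq_eq_false_iff_ne.mpr h2
  have e3 : (k == "Output") = false := beq_eq_false_iff_ne.mpr h3
  have e4 : (k == "Col1") = false := beq_eq_false_iff_ne.mpr h4
  have e5 : (k == "Type") = false := beq_eq_false_iff_ne.mpr h5
  have e6 : (k == "Accepts") = false := beq_eq_false_iff_ne.mpr h6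
  have e7 : (k == "Col2") = false := beq_eq_false_iff_ne.mpr h7
  have e8 : (k == "Description") = false := beq_eq_false_iff_ne.mpr h8
  have e9 : (k == "Col3") = false := beq_eq_false_iff_ne.mpr h9
  simp [stepB, stepF, unitF, pvSource, ksrA, ksrT, ksrD, List.lookup,
    e1, e2, e3, e4, e5, e6, e7, e8, e9, mergeMin_none_right]

def itemA (r : List (String × String)) : List (String × String) :=
  let argument := pyOr (pyOr (pyOr (r.lookup "Variable") (r.lookup "Name"))
      (r.lookup "Output")) (r.lookup "Col1")
  let ptype := pyOr (pyOr (r.lookup "Type") (r.lookup "Accepts"))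
      (r.lookup "Col2")
  let description := pyOr (r.lookup "Description") (r.lookup "Col3")
  let item : List (String × String) := []
  let item := if pyTruthy argument then item ++ [("Argument", argument.getD "")] else item
  let item := if pyTruthy ptype then item ++ [("Type", ptype.getD "")] else item
  let item := if pyTruthy description then item ++ [("Description", description.getD "")] else item
  item

theorem stepA_unfold (out : List (List (String × String))) (r : List (String × String)) :
    mapOutputStepA out r = if !(itemA r).isEmpty then out ++ [itemA r] else out := rfl

theorem foldl_stepB_triple (ps : List (String × String)) :
    ∀ a t d, ps.foldl stepB [a, t, d] =
      [ps.foldl (stepF ksrA) a, ps.foldl (stepF ksrT) t, ps.foldl (stepF ksrD) d] := by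
  induction ps with
  | nil => intro a t d; rfl
  | cons p ps ih =>
    intro a t d
    simp only [List.foldl_cons, stepB_components, ih]

theorem itemA_eq (r : List (String × String)) : itemA r = rowItemB r := by
  have hknd := firstOcc_keys_nodup r
  have hbA : (firstOcc r).foldl (stepF ksrA) none = chainR (firstOcc r) ksrA :=
    bestF_eq_chainR ksrA (firstOcc r) hknd (by decide) (by decide)
  have hbT : (firstOcc r).foldl (stepF ksrT) none = chainR (firstOcc r) ksrT :=
    bestF_eq_chainR ksrT (firstOcc r) hknd (by decide) (by decide)
  have hbD : (firstOcc r).foldl (stepF ksrD) none = chainR (firstOcc r) ksrD :=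
    bestF_eq_chainR ksrD (firstOcc r) hknd (by decide) (by decide)
  have eA : pyOr (pyOr (pyOr (r.lookup "Variable") (r.lookup "Name"))
      (r.lookup "Output")) (r.lookup "Col1") = pyOrChain (firstOcc r) (ksrA.map (·.1)) := by
    simp [pyOrChain, ksrA, lookup_firstOcc, pyOr_assoc]
  have eT : pyOr (pyOr (r.lookup "Type") (r.lookup "Accepts")) (r.lookup "Col2")
      = pyOrChain (firstOcc r) (ksrT.map (·.1)) := by
    simp [pyOrChain, ksrT, lookup_firstOcc, pyOr_assoc]
  have eD : pyOr (r.lookup "Description") (r.lookup "Col3")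
      = pyOrChain (firstOcc r) (ksrD.map (·.1)) := by
    simp [pyOrChain, ksrD, lookup_firstOcc]
  obtain ⟨tA, vA⟩ := chain_bridge (firstOcc r) ksrA
  obtain ⟨tT, vT⟩ := chain_bridge (firstOcc r) ksrT
  obtain ⟨tD, vD⟩ := chain_bridge (firstOcc r) ksrD
  rw [itemA, rowItemB, foldl_stepB_triple, hbA, hbT, hbD]
  rw [eA, eT, eD]
  cases hA : chainR (firstOcc r) ksrA with
  | none =>
    rw [hA] at tA
    cases hT : chainR (firstOcc r) ksrT with
    | none =>
      rw [hT] at tT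
      cases hD : chainR (firstOcc r) ksrD with
      | none => rw [hD] at tD; simp [pvFields, List.zip, tA, tT, tD]
      | some qd =>
        rw [vD qd hD, hD] at tD
        simp [pvFields, List.zip, tA, tT, tD, vD qd hD]
    | some qt =>
      rw [vT qt hT, hT] at tT
      cases hD : chainR (firstOcc r) ksrD with
      | none => rw [hD] at tD; simp [pvFields, List.zip, tA, tT, tD, vT qt hT]
      | some qd =>
        rw [vD qd hD, hD] at tD
        simp [pvFields, List.zip, tA, tT, tD, vT qt hT, vD qd hD]
  | some qa =>
    rw [vA qa hA, hA] at tA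
    cases hT : chainR (firstOcc r) ksrT with
    | none =>
      rw [hT] at tT
      cases hD : chainR (firstOcc r) ksrD with
      | none => rw [hD] at tD; simp [pvFields, List.zip, tA, tT, tD, vA qa hA]
      | some qd =>
        rw [vD qd hD, hD] at tD
        simp [pvFields, List.zip, tA, tT, tD, vA qa hA, vD qd hD]
    | some qt =>
      rw [vT qt hT, hT] at tT
      cases hD : chainR (firstOcc r) ksrD with
      | none => rw [hD] at tD; simp [pvFields, List.zip, tA, tT, tD, vA qa hA, vT qt hT]
      | some qd =>
        rw [vD qd hD, hD] at tD
        simp [pvFields, List.zip, tA, tT, tD, vA qa hA, vT qt hT, vD qd hD]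

theorem stepA_eq_alt (out : List (List (String × String))) (r : List (String × String)) :
    mapOutputStepA out r = if !(rowItemB r).isEmpty then out ++ [rowItemB r] else out := by
  rw [stepA_unfold, itemA_eq]

theorem foldl_eq (rows : List (List (String × String))) :
    ∀ acc, rows.foldl mapOutputStepA acc =
      rows.foldl (fun out r =>
        let item := rowItemB r
        if !item.isEmpty then out ++ [item] else out) acc := by
  induction rows with
  | nil => intro acc; rfl
  | cons r rs ih =>
    intro acc
    simp only [List.foldl_cons, stepA_eq_alt, ih]

-- ===== VERDICT (by name: the statement is the Claim_ definition above) =====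
theorem map_output_py_spec : Claim_equal_map_output_py := by
  intro rows _
  show map_output_py rows = map_output_py_alt rows
  simp only [map_output_py, map_output_py_alt, foldl_eq]
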